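-- pv_equiv track=rewrite | github.com/rebuilder945/FL_research | ast_research/python_code_5.23/lastterm_page10/success_code/开心驰-3492-2023-06-09_13_18_17.py | count
-- ===== SOURCE A (Python) =====
-- def count(s, ch):
--     b={}
--     for i in range(len(s)):
--         if s[i] not in b:
--             b[s[i]]=1
--         else:
--             b[s[i]]+=1
--     for i in b:
--         if b[i]==1:
--             return b[i]
--     return None
-- ===== SOURCE B (Python) =====
-- def count(s, ch):
--     t = sorted(s)
--     n = len(t)
--     for i in range(n):
--         if (i == 0 or t[i - 1] != t[i]) and (i == n - 1 or t[i] != t[i + 1]):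
--             return 1
--     return None
-- ===== Notes on version B (the rewrite author's own statement) =====
-- stated objective: alternative
-- what changed: Replaces the frequency dict plus key scan with sort-then-adjacent-scan: a character occurs exactly once iff in the sorted string some position differs from both neighbours.
import Mathlib
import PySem

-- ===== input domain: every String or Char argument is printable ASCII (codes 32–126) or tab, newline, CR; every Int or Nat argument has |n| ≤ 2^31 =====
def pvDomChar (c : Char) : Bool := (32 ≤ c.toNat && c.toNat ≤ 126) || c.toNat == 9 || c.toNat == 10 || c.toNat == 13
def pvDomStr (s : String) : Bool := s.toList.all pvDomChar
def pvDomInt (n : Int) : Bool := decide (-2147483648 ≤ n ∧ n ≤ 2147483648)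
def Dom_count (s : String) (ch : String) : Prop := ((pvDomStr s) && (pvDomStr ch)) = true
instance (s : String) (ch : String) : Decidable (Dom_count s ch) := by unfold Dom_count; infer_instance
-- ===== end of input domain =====

-- B replaces A's frequency dict + key scan by sort-then-adjacent-scan: a character occurs exactly once
-- iff in the sorted string some position differs from both neighbours (objective: alternative).


-- ===== PORT A =====
-- second loop of A: 'for i in b: if b[i]==1: return b[i]'  (b[i] via getD 0; i ∈ b.keys so no KeyError)
def countScanA (b : PySem.Dict Char Int) : List Char → Option Int
  | [] => none
  | k :: ks => if b.getD k 0 == 1 then some (b.getD k 0) else countScanA b ks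

-- 'for i in range(len(s))' reads s[0..len-1] in order = fold over s.toList
def count (s : String) (ch : String) : Option Int :=
  let b : PySem.Dict Char Int :=
    s.toList.foldl (fun b c => if b.contains c then b.insert c (b.getD c 0 + 1) else b.insert c 1)
      PySem.Dict.empty
  countScanA b b.keys

-- ===== PORT B =====
-- '(i == 0 or t[i-1] != t[i]) and (i == n-1 or t[i] != t[i+1])': the guarded indices t[i-1]/t[i+1]
-- are ported via getD; Python short-circuits exactly when the guard disjunct is true, so the
-- default value is never the decisive one and the Bool value is exact.
def isoAt (t : List Char) (n i : Nat) : Bool :=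
  (decide (i = 0) || !(t.getD (i - 1) ' ' == t.getD i ' ')) &&
  (decide (i = n - 1) || !(t.getD i ' ' == t.getD (i + 1) ' '))

-- 'for i in range(n): if …: return 1' then 'return None'
def scanB (t : List Char) (n : Nat) : List Nat → Option Int
  | [] => none
  | i :: is => if isoAt t n i then some 1 else scanB t n is

def count_alt (s : String) (ch : String) : Option Int :=
  let t := PySem.List.sorted s.toList (fun c => c) false
  scanB t t.length (List.range t.length)

-- ===== PRECONDITION & SPEC =====
def Spec_count (s : String) (ch : String) (out : Option Int) : Prop := out = count_alt s ch
instance (s : String) (ch : String) (out : Option Int) : Decidable (Spec_count s ch out) := by unfold Spec_count; infer_instance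

-- ===== CLAIM (what is proved, stated in full; the proofs are below) =====
def Claim_equal_count : Prop := ∀ (s : String) (ch : String), Dom_count s ch → Spec_count s ch (count s ch)

-- ===== LEMMAS AND PROOFS =====

theorem count_fold_eq_counter (xs : List Char) :
    xs.foldl (fun b c => if b.contains c then b.insert c (b.getD c 0 + 1) else b.insert c 1)
      PySem.Dict.empty = PySem.Dict.counter xs := by
  rw [← PySem.Dict.foldl_insert_getD_add_one_eq_counter]
  apply PySem.List.foldl_congr_mem
  intro b c _
  by_cases h : b.contains c = true
  · simp [h]
  · have hg : b.getD c 0 = 0 := by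
      have hc := PySem.Dict.contains_eq_isSome_get? (d := b) (k := c)
      have hb : b.contains c = false := by simpa using h
      rw [hb] at hc
      have hn : b.get? c = none := Option.not_isSome_iff_eq_none.mp (by simp [← hc])
      simp [PySem.Dict.getD, hn]
    rw [if_neg h, hg]; norm_num

theorem scanA_counter (xs : List Char) (l : List Char) :
    countScanA (PySem.Dict.counter xs) l =
      if l.any (fun k => xs.count k == 1) then some 1 else none := by
  induction l with
  | nil => rfl
  | cons k ks ih =>
    simp only [countScanA, PySem.Dict.getD_counter, ih, List.any_cons]
    by_cases h : xs.count k = 1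
    · simp [h]
    · have h' : ¬ ((xs.count k : Int) = 1) := by exact_mod_cast h
      simp [h, h']

theorem any_ofList (xs : List Char) (p : Char → Bool) :
    (PySem.Set.ofList xs).any p = xs.any p := by
  rw [Bool.eq_iff_iff]
  simp only [List.any_eq_true, PySem.Set.mem_ofList]

theorem count_char (s ch : String) :
    count s ch = if s.toList.any (fun c => s.toList.count c == 1) then some 1 else none := by
  unfold count
  rw [count_fold_eq_counter]
  show countScanA (PySem.Dict.counter s.toList) (PySem.Dict.counter s.toList).keys = _
  rw [PySem.Dict.keys_counter, scanA_counter, any_ofList]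

theorem scanB_char (t : List Char) (n : Nat) (l : List Nat) :
    scanB t n l = if l.any (isoAt t n) then some 1 else none := by
  induction l with
  | nil => rfl
  | cons i is ih =>
    simp only [scanB, ih, List.any_cons]
    by_cases h : isoAt t n i = true
    · simp [h]
    · simp [h]

theorem isoAt_iff (t : List Char) (n i : Nat) :
    isoAt t n i = true ↔
      (i = 0 ∨ t.getD (i - 1) ' ' ≠ t.getD i ' ') ∧
      (i = n - 1 ∨ t.getD i ' ' ≠ t.getD (i + 1) ' ') := by
  simp [isoAt]

theorem count_two_of_idx {l : List Char} {c : Char} :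
    ∀ {i j : Nat}, i < j → l[i]? = some c → l[j]? = some c → 2 ≤ l.count c := by
  induction l with
  | nil => intro i j _ hi _; simp at hi
  | cons a tl ih =>
    intro i j hij hi hj
    cases i with
    | zero =>
      have ha : a = c := by simpa using hi
      cases j with
      | zero => omega
      | succ j' =>
        have hc : c ∈ tl := by
          have := List.getElem?_eq_some_iff.mp (by simpa using hj)
          obtain ⟨h1, h2⟩ := this
          exact h2 ▸ List.getElem_mem h1
        have h1 : 1 ≤ tl.count c := List.count_pos_iff.mpr hc
        subst ha
        rw [List.count_cons_self]
        omega
    | succ i' =>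
      cases j with
      | zero => omega
      | succ j' =>
        have h2 := ih (by omega : i' < j') (by simpa using hi) (by simpa using hj)
        have h3 : tl.count c ≤ (a :: tl).count c := by
          rw [List.count_cons]
          split <;> omega
        omega

theorem exists_idx_of_two_le_count {l : List Char} {c : Char} (h : 2 ≤ l.count c) :
    ∃ i j : Nat, i < j ∧ l[i]? = some c ∧ l[j]? = some c := by
  induction l with
  | nil => simp at h
  | cons a tl ih =>
    by_cases ha : a = c
    · subst ha
      have htl : 1 ≤ tl.count a := by rw [List.count_cons_self] at h; omega
      have hc : a ∈ tl := List.count_pos_iff.mp htl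
      obtain ⟨k, hk, hval⟩ := List.mem_iff_getElem.mp hc
      refine ⟨0, k + 1, by omega, by simp, ?_⟩
      rw [List.getElem?_cons_succ, List.getElem?_eq_getElem hk]
      exact congrArg some hval
    · have htl : 2 ≤ tl.count c := by rwa [List.count_cons_of_ne ha] at h
      obtain ⟨i, j, hij, hi, hj⟩ := ih htl
      exact ⟨i + 1, j + 1, by omega, by simpa using hi, by simpa using hj⟩

-- the sorted list: equal values are detectable from the immediate neighbours
theorem iso_iff (xs : List Char) :
    (∃ c ∈ xs, xs.count c = 1) ↔
      ∃ i < (PySem.List.sorted xs (fun c => c) false).length,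
        isoAt (PySem.List.sorted xs (fun c => c) false)
          (PySem.List.sorted xs (fun c => c) false).length i = true := by
  set t := PySem.List.sorted xs (fun c => c) false with ht
  have hperm : t.Perm xs := PySem.List.sorted_perm xs (fun c => c) false
  have hmono : ∀ p q : Nat, (hpq : p ≤ q) → (hq : q < t.length) → t[p]'(by omega) ≤ t[q] := by
    intro p q hpq hq
    exact PySem.List.sorted_id_getElem_mono (xs := xs) hpq hq
  have hgetD : ∀ i : Nat, (hi : i < t.length) → t.getD i ' ' = t[i] := by
    intro i hi
    simp [List.getD_eq_getElem?_getD, List.getElem?_eq_getElem hi]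
  constructor
  · rintro ⟨c, hcmem, hcount⟩
    have hct : c ∈ t := hperm.mem_iff.mpr hcmem
    obtain ⟨i, hi, hval⟩ := List.mem_iff_getElem.mp hct
    have hcountt : t.count c = 1 := by rw [hperm.count_eq]; exact hcount
    refine ⟨i, hi, (isoAt_iff t t.length i).mpr ⟨?_, ?_⟩⟩
    · by_cases h0 : i = 0
      · exact Or.inl h0
      · refine Or.inr ?_
        rw [hgetD i hi, hgetD (i - 1) (by omega), hval]
        intro heq
        have h2 : 2 ≤ t.count c := by
          refine count_two_of_idx (i := i - 1) (j := i) (by omega) ?_ ?_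
          · rw [List.getElem?_eq_getElem (by omega : i - 1 < t.length)]
            exact congrArg some heq
          · rw [List.getElem?_eq_getElem hi]; exact congrArg some hval
        omega
    · by_cases hn : i = t.length - 1
      · exact Or.inl hn
      · refine Or.inr ?_
        have hi1 : i + 1 < t.length := by omega
        rw [hgetD i hi, hgetD (i + 1) hi1, hval]
        intro heq
        have h2 : 2 ≤ t.count c := by
          refine count_two_of_idx (i := i) (j := i + 1) (by omega) ?_ ?_
          · rw [List.getElem?_eq_getElem hi]; exact congrArg some hval
          · rw [List.getElem?_eq_getElem hi1]; exact congrArg some heq.symm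
        omega
  · rintro ⟨i, hi, hiso⟩
    obtain ⟨h1, h2⟩ := (isoAt_iff t t.length i).mp hiso
    set c := t[i] with hc
    refine ⟨c, hperm.mem_iff.mp (List.getElem_mem hi), ?_⟩
    rw [← hperm.count_eq]
    have hpos : 1 ≤ t.count c := List.count_pos_iff.mpr (List.getElem_mem hi)
    by_contra hne
    have h2c : 2 ≤ t.count c := by omega
    obtain ⟨p, q, hpq, hp, hq⟩ := exists_idx_of_two_le_count h2c
    have hql : q < t.length := (List.getElem?_eq_some_iff.mp hq).1
    have hpl : p < t.length := by omega
    have hpv : t[p]'hpl = c := (List.getElem?_eq_some_iff.mp hp).2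
    have hqv : t[q]'hql = c := (List.getElem?_eq_some_iff.mp hq).2
    -- some index ≠ i carries value c; its side's neighbour of i must equal c by monotonicity
    have hnb : (0 < i ∧ t.getD (i - 1) ' ' = c) ∨ (i + 1 < t.length ∧ t.getD (i + 1) ' ' = c) := by
      by_cases hki : q ≤ i
      · have hpi : p < i := by omega
        have h0 : 0 < i := by omega
        have him : i - 1 < t.length := by omega
        have hle1 : t[p]'hpl ≤ t[i - 1]'him := hmono p (i - 1) (by omega) him
        have hle2 : t[i - 1]'him ≤ t[i] := hmono (i - 1) i (by omega) hi
        have hub : t[i - 1]'him ≤ c := by rw [hc]; exact hle2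
        have hlb : c ≤ t[i - 1]'him := by rw [← hpv]; exact hle1
        exact Or.inl ⟨h0, by rw [hgetD (i - 1) him]; exact le_antisymm hub hlb⟩
      · have hiq : i < q := by omega
        have hi1 : i + 1 < t.length := by omega
        have hle1 : t[i] ≤ t[i + 1]'hi1 := hmono i (i + 1) (by omega) hi1
        have hle2 : t[i + 1]'hi1 ≤ t[q]'hql := hmono (i + 1) q (by omega) hql
        have hub : t[i + 1]'hi1 ≤ c := by rw [← hqv]; exact hle2
        have hlb : c ≤ t[i + 1]'hi1 := by rw [hc]; exact hle1
        exact Or.inr ⟨hi1, by rw [hgetD (i + 1) hi1]; exact le_antisymm hub hlb⟩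
    rcases hnb with ⟨h0, hv⟩ | ⟨hi1, hv⟩
    · rcases h1 with h | h
      · omega
      · exact h (by rw [hv, hgetD i hi])
    · rcases h2 with h | h
      · omega
      · exact h (by rw [hgetD i hi, hv])

-- ===== VERDICT (by name: the statement is the Claim_ definition above) =====
theorem any_count_eq_any_iso (xs : List Char) :
    (xs.any fun c => xs.count c == 1) =
      ((List.range (PySem.List.sorted xs (fun c => c) false).length).any
        (isoAt (PySem.List.sorted xs (fun c => c) false)
          (PySem.List.sorted xs (fun c => c) false).length)) := by
  rw [Bool.eq_iff_iff]
  simp only [List.any_eq_true, List.mem_range, beq_iff_eq]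
  exact iso_iff xs

theorem count_spec : Claim_equal_count := by
  intro s ch _
  unfold Spec_count
  rw [count_char]
  unfold count_alt
  simp only [scanB_char]
  rw [any_count_eq_any_iso]
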